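-- pv_equiv track=rewrite | github.com/prositen/advent-of-code | python/src/y2016/dec19.py | steal_across_dumb
-- ===== SOURCE A (Python) =====
-- def steal_across_dumb(no_elves):
--     """
--     Brute-force algorithm used so I could find a pattern.
--     :param no_elves:
--     :return:
--     """
--     elf_count = no_elves
--     elves = [x for x in range(1, no_elves + 1)]
--     while elf_count > 1:
--         mid = elf_count // 2
--         elves = elves[1:mid] + elves[mid + 1:] + elves[0:1]
--         elf_count = len(elves)
--     return elves[0]
-- ===== SOURCE B (Python) =====
-- def steal_across_dumb(no_elves):
--     # Track only the 0-based circle index of the eventual winner, growing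
--     # the circle from 2 up to no_elves; no list is ever built.
--     m = 0
--     for k in range(2, no_elves + 1):
--         mid = k // 2
--         if m == k - 2:
--             m = 0
--         elif m < mid - 1:
--             m = m + 1
--         else:
--             m = m + 2
--     return m + 1
-- ===== Notes on version B (the rewrite author's own statement) =====
-- stated objective: faster
-- what changed: B drops A's list simulation (rebuilding the elf list by slicing each round) and instead tracks only the 0-based circle index of the eventual winner while growing the circle from 2 to n, using the inverse of one elimination step.
import Mathlib
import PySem

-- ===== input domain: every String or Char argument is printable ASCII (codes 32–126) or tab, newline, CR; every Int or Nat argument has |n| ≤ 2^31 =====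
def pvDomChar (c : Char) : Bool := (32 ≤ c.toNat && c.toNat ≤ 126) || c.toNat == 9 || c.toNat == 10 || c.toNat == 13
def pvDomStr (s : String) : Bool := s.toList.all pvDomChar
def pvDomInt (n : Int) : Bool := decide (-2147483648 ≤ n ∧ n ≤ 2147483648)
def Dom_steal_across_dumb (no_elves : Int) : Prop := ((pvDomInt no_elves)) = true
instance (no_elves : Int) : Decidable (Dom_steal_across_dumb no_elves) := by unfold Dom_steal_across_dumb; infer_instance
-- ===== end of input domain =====

-- B replaces A's O(n^2) list-slicing simulation by an O(n) loop that tracks only the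
-- winner's circle index (objective: faster; measured).


-- ===== PORT A =====
-- Python's `while elf_count > 1` with `elf_count = len(elves)` (the initial `elf_count =
-- no_elves` equals len(elves) whenever the loop can run, and for no_elves ≤ 1 both guards fail).
def stealALoop : Nat → List Int → List Int
  | 0, elves => elves
  | fuel + 1, elves =>
    if 1 < elves.length then
      let mid : Int := PySem.Int.floordiv (elves.length : Int) 2
      stealALoop fuel
        (PySem.List.slice elves (some 1) (some mid) ++
         PySem.List.slice elves (some (mid + 1)) none ++
         PySem.List.slice elves (some 0) (some 1))
    else elves

def steal_across_dumb (no_elves : Int) : Int :=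
  let elves := PySem.List.pyRange 1 (no_elves + 1) 1
  -- `elves[0]` raises IndexError on the empty list; Pre_ excludes that (no_elves ≤ 0)
  (PySem.List.pyGet? (stealALoop elves.length elves) 0).getD 0

-- ===== PORT B =====
def steal_across_dumb_alt (no_elves : Int) : Int :=
  (PySem.List.pyRange 2 (no_elves + 1) 1).foldl
    (fun m k =>
      let mid := PySem.Int.floordiv k 2
      if m = k - 2 then 0
      else if m < mid - 1 then m + 1
      else m + 2) 0 + 1

-- ===== PRECONDITION & SPEC =====
-- Pre_ excludes no_elves ≤ 0, where A's `elves[0]` raises IndexError on the empty list.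
def Pre_steal_across_dumb (no_elves : Int) : Prop := 1 ≤ no_elves
instance (no_elves : Int) : Decidable (Pre_steal_across_dumb no_elves) := by unfold Pre_steal_across_dumb; infer_instance
def pvWitness_steal_across_dumb : Int := 5

def Spec_steal_across_dumb (no_elves : Int) (out : Int) : Prop := out = steal_across_dumb_alt no_elves
instance (no_elves : Int) (out : Int) : Decidable (Spec_steal_across_dumb no_elves out) := by unfold Spec_steal_across_dumb; infer_instance

-- ===== CLAIM (what is proved, stated in full; the proofs are below) =====
def Claim_equal_steal_across_dumb : Prop := ∀ (no_elves : Int), Dom_steal_across_dumb no_elves → Pre_steal_across_dumb no_elves → Spec_steal_across_dumb no_elves (steal_across_dumb no_elves)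

-- ===== LEMMAS AND PROOFS =====

-- 0-based index, in the original circle of n elves, of the eventual winner
def wIdx : Nat → Nat
  | 0 => 0
  | 1 => 0
  | (n+2) =>
      let m := wIdx (n+1)
      if m = n then 0
      else if m + 1 < (n+2)/2 then m + 1
      else m + 2

lemma wIdx_lt : ∀ n : Nat, 1 ≤ n → wIdx n < n := by
  intro n
  induction n with
  | zero => omega
  | succ k ih =>
    intro _
    match k, ih with
    | 0, _ => simp [wIdx]
    | (j+1), ih =>
      have hm := ih (by omega)
      simp only [wIdx]
      split_ifs with h1 h2 <;> omega

lemma stealALoop_getD (n : Nat) : ∀ (L : List Int), L.length = n → 1 ≤ n →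
    stealALoop n L = [L.getD (wIdx n) 0] := by
  induction n with
  | zero => intro L _ h; omega
  | succ k ih =>
    intro L hL _
    match k, ih with
    | 0, _ =>
      match L, hL with
      | [a], _ =>
        simp [stealALoop, wIdx]
    | (j+1), ih =>
      have hlen : 1 < L.length := by omega
      rw [stealALoop, if_pos hlen]
      have hmid : PySem.Int.floordiv (L.length : Int) 2 = ((L.length / 2 : Nat) : Int) := by
        exact_mod_cast PySem.Int.floordiv_natCast L.length 2
      rw [hmid]
      dsimp only
      rw [PySem.List.slice_toNat L (a := 1) (b := ((L.length / 2 : Nat) : Int)) (by omega) (by positivity),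
          PySem.List.slice_from L (a := ((L.length / 2 : Nat) : Int) + 1) (by positivity),
          PySem.List.slice_toNat L (a := 0) (b := 1) (by omega) (by omega)]
      set M : Nat := L.length / 2 with hM
      have hMb : 1 ≤ M ∧ M ≤ j + 1 := by omega
      have ht : (((M : Nat) : Int) + 1).toNat = M + 1 := by omega
      have h10 : ((1 : Int)).toNat = 1 := rfl
      have h00 : ((0 : Int)).toNat = 0 := rfl
      simp only [ht, h10, h00, Int.toNat_natCast, Nat.sub_zero, List.drop_zero]
      set L' : List Int :=
        List.take (M - 1) (List.drop 1 L) ++ List.drop (M + 1) L ++ List.take 1 L with hL'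
      have hlen' : L'.length = j + 1 := by
        simp [hL', List.length_append, List.length_take, List.length_drop]
        omega
      rw [ih L' hlen' (by omega)]
      congr 1
      have hm := wIdx_lt (j + 1) (by omega)
      set m : Nat := wIdx (j + 1) with hmdef
      have hwx : wIdx (j + 2) = if m = j then 0 else if m + 1 < (j + 2) / 2 then m + 1 else m + 2 := rfl
      have hM2 : (j + 2) / 2 = M := by omega
      rw [hwx, hM2]
      rw [List.getD_eq_getElem?_getD, List.getD_eq_getElem?_getD]
      by_cases h1 : m = j
      · -- winner was the rotated-to-back original head
        rw [if_pos h1, h1]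
        rw [List.getElem?_append_right (by simp [List.length_take, List.length_drop]; omega)]
        rw [List.getElem?_take]
        have : j - (List.take (M - 1) (List.drop 1 L) ++ List.drop (M + 1) L).length = 0 := by
          simp [List.length_take, List.length_drop]; omega
        rw [this]
        simp
      · rw [if_neg h1]
        by_cases h2 : m + 1 < M
        · -- winner inside the first slice
          rw [if_pos h2]
          rw [List.getElem?_append_left (by simp [List.length_take]; omega)]
          rw [List.getElem?_append_left (by simp [List.length_take]; omega)]
          rw [List.getElem?_take, if_pos (by omega), List.getElem?_drop]
          norm_num [Nat.add_comm]
        · -- winner inside the second slice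
          rw [if_neg h2]
          rw [List.getElem?_append_left (by simp [List.length_take]; omega)]
          rw [List.getElem?_append_right (by simp [List.length_take]; omega)]
          rw [List.getElem?_drop]
          have : M + 1 + (m - (List.take (M - 1) (List.drop 1 L)).length) = m + 2 := by
            simp [List.length_take]; omega
          rw [this]

lemma foldB (n : Nat) (hn : 1 ≤ n) :
    (PySem.List.pyRange 2 ((n : Int) + 1) 1).foldl
      (fun m k =>
        let mid := PySem.Int.floordiv k 2
        if m = k - 2 then 0
        else if m < mid - 1 then m + 1
        else m + 2) 0 = ((wIdx n : Nat) : Int) := by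
  induction n with
  | zero => omega
  | succ k ih =>
    match k, ih with
    | 0, _ =>
      rw [show ((0 + 1 : Nat) : Int) + 1 = 2 by norm_num]
      rw [PySem.List.pyRange_one_eq_nil (by omega)]
      simp [wIdx]
    | (j+1), ih =>
      have h := ih (by omega)
      have hb : ((j + 1 + 1 : Nat) : Int) + 1 = (((j + 1 : Nat) : Int) + 1) + 1 := by push_cast; ring
      rw [hb, PySem.List.pyRange_one_succ_right (by push_cast; omega), List.foldl_append, h]
      simp only [List.foldl_cons, List.foldl_nil]
      have hm := wIdx_lt (j + 1) (by omega)
      have hmid2 : PySem.Int.floordiv (((j + 1 : Nat) : Int) + 1) 2 = (((j + 2) / 2 : Nat) : Int) := by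
        rw [show (((j + 1 : Nat) : Int) + 1) = ((j + 2 : Nat) : Int) by push_cast; ring]
        exact_mod_cast PySem.Int.floordiv_natCast (j + 2) 2
      rw [hmid2]
      have hwx : wIdx (j + 1 + 1) =
          if wIdx (j + 1) = j then 0
          else if wIdx (j + 1) + 1 < (j + 2) / 2 then wIdx (j + 1) + 1
          else wIdx (j + 1) + 2 := rfl
      rw [hwx]
      split_ifs <;> push_cast at * <;> omega

-- ===== VERDICT (by name: the statement is the Claim_ definition above) =====
theorem steal_across_dumb_spec : Claim_equal_steal_across_dumb := by
  intro ne _ hpre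
  unfold Pre_steal_across_dumb at hpre
  unfold Spec_steal_across_dumb steal_across_dumb steal_across_dumb_alt
  set n : Nat := ne.toNat with hn
  have hne : ne = (n : Int) := by omega
  have hn1 : 1 ≤ n := by omega
  have hlen : (PySem.List.pyRange 1 (ne + 1) 1).length = n := by
    rw [PySem.List.length_pyRange_one]; omega
  dsimp only
  rw [hlen, stealALoop_getD n _ hlen hn1]
  rw [hne, foldB n hn1]
  have hw := wIdx_lt n hn1
  have hgd : (PySem.List.pyRange 1 ((n : Int) + 1) 1).getD (wIdx n) 0 = 1 + (wIdx n : Int) := by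
    rw [List.getD_eq_getElem?_getD, PySem.List.getElem?_pyRange_one, if_pos (by omega)]
    rfl
  rw [hgd]
  simp [PySem.List.pyGet?, PySem.List.pyIdx?]
  ring
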